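-- pv_equiv track=rewrite | github.com/rhkdguskim/Study | 백준/Gold/2295. 세 수의 합/세 수의 합.py | find
-- ===== SOURCE A (Python) =====
-- def find(arr, v):
--     start, end = 0, len(arr)-1
--     idx = -1
--     while end >= start:
--         mid = (start + end) // 2
--         if arr[mid][0] >= v:
--             idx = mid
--             end = mid - 1
--         else:
--             start = mid + 1
--     return idx
-- ===== SOURCE B (Python) =====
-- def find(arr, v):
--     def bs(xs):
--         if not xs:
--             return 0
--         m = (len(xs) - 1) // 2
--         if xs[m][0] >= v:
--             return bs(xs[:m])
--         return m + 1 + bs(xs[m + 1:])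
--     idx = bs(arr)
--     return idx if idx < len(arr) else -1
-- ===== Notes on version B (the rewrite author's own statement) =====
-- stated objective: alternative
-- what changed: Replaced A's iterative index-pair loop with a best-so-far accumulator by a structurally recursive divide-and-conquer on list slices: the helper recurses on xs[:m] or xs[m+1:] and returns an insertion point with an offset, no indices or accumulator threaded through.
import Mathlib
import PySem

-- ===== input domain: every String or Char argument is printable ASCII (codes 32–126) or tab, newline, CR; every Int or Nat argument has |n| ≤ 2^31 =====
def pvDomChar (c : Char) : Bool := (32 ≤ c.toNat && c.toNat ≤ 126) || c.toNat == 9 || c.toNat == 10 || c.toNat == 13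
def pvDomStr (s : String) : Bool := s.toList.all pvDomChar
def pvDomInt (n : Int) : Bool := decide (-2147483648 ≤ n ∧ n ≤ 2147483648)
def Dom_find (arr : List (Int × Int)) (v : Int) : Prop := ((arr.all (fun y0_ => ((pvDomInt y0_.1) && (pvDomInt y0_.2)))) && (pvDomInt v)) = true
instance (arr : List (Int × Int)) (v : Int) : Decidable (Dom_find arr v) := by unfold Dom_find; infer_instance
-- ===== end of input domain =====

-- B replaces A's index-pair while-loop (with a best-so-far accumulator) by a
-- structurally recursive divide-and-conquer on list slices; same results.

-- ===== PORT A =====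
-- the while-loop of A over the state (start, end, idx); arr[mid] is always in
-- range when the loop body runs, so the .getD default (0,0) is never used
def findLoop (arr : List (Int × Int)) (v : Int) (start stop idx : Int) : Int :=
  if stop ≥ start then
    let mid := PySem.Int.floordiv (start + stop) 2
    if ((PySem.List.pyGet? arr mid).getD (0, 0)).1 ≥ v then
      findLoop arr v start (mid - 1) mid
    else
      findLoop arr v (mid + 1) stop idx
  else idx
termination_by (stop - start + 1).toNat
decreasing_by
  · have h := PySem.Int.floordiv_two_mid_bounds (by omega : start ≤ stop)
    omega
  · have h := PySem.Int.floordiv_two_mid_bounds (by omega : start ≤ stop)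
    omega

def find (arr : List (Int × Int)) (v : Int) : Int :=
  findLoop arr v 0 ((arr.length : Int) - 1) (-1)

-- ===== PORT B =====
-- B's helper bs(xs): recursion on slices of the list itself; returns the
-- insertion point within xs (xs[m] is in range since xs is nonempty there)
def findBs (v : Int) (xs : List (Int × Int)) : Int :=
  if xs.isEmpty then 0
  else
    let m := PySem.Int.floordiv ((xs.length : Int) - 1) 2
    if ((PySem.List.pyGet? xs m).getD (0, 0)).1 ≥ v then
      findBs v (PySem.List.slice xs none (some m))
    else
      m + 1 + findBs v (PySem.List.slice xs (some (m + 1)) none)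
termination_by xs.length
decreasing_by
  · rename_i hne _
    have hlen : 1 ≤ xs.length := by cases xs <;> simp_all
    have h := PySem.Int.floordiv_two_mid_bounds (by omega : (0:Int) ≤ (xs.length : Int) - 1)
    rw [zero_add] at h
    rw [PySem.List.slice_to _ (by omega)]
    rw [List.length_take]
    omega
  · rename_i hne _
    have hlen : 1 ≤ xs.length := by cases xs <;> simp_all
    have h := PySem.Int.floordiv_two_mid_bounds (by omega : (0:Int) ≤ (xs.length : Int) - 1)
    rw [zero_add] at h
    rw [PySem.List.slice_from _ (by omega)]
    rw [List.length_drop]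
    omega

def find_alt (arr : List (Int × Int)) (v : Int) : Int :=
  let idx := findBs v arr
  if idx < (arr.length : Int) then idx else -1

-- ===== PRECONDITION & SPEC =====
def Spec_find (arr : List (Int × Int)) (v : Int) (out : Int) : Prop := out = find_alt arr v
instance (arr : List (Int × Int)) (v : Int) (out : Int) : Decidable (Spec_find arr v out) := by unfold Spec_find; infer_instance

-- ===== CLAIM (what is proved, stated in full; the proofs are below) =====
def Claim_equal_find : Prop := ∀ (arr : List (Int × Int)) (v : Int), Dom_find arr v → Spec_find arr v (find arr v)

-- ===== LEMMAS AND PROOFS =====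

-- the midpoint index picked by B's helper, in terms of the slice length
theorem findBs_bounds (v : Int) (xs : List (Int × Int)) :
    0 ≤ findBs v xs ∧ findBs v xs ≤ (xs.length : Int) := by
  fun_induction findBs v xs with
  | case1 xs he => simp
  | case2 xs he m hge ih =>
    have hlen : 1 ≤ xs.length := by cases xs <;> simp_all
    have h := PySem.Int.floordiv_two_mid_bounds (by omega : (0:Int) ≤ (xs.length : Int) - 1)
    rw [zero_add] at h
    have hsl : (PySem.List.slice xs none (some m)).length = min m.toNat xs.length := by
      rw [PySem.List.slice_to _ (by omega), List.length_take]
    omega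
  | case3 xs he m hge ih =>
    have hlen : 1 ≤ xs.length := by cases xs <;> simp_all
    have h := PySem.Int.floordiv_two_mid_bounds (by omega : (0:Int) ≤ (xs.length : Int) - 1)
    rw [zero_add] at h
    have hsl : (PySem.List.slice xs (some (m + 1)) none).length = xs.length - (m + 1).toNat := by
      rw [PySem.List.slice_from _ (by omega), List.length_drop]
    omega

-- A's loop on the window [s, s+L-1] of arr computes B's insertion point for
-- the slice (arr.drop s).take L, offset by s, or returns the accumulator
theorem findLoop_eq_findBs (arr : List (Int × Int)) (v : Int) (L : Nat) :
    ∀ (s : Nat) (idx : Int), s + L ≤ arr.length →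
    findLoop arr v (s : Int) ((s : Int) + (L : Int) - 1) idx =
      if findBs v ((arr.drop s).take L) < (L : Int)
      then (s : Int) + findBs v ((arr.drop s).take L) else idx := by
  induction L using Nat.strong_induction_on with
  | _ L IH =>
    intro s idx hL
    by_cases hL0 : L = 0
    · subst hL0
      rw [findLoop, if_neg (by omega)]
      simp [findBs]
    -- the window is nonempty
    have hseg : ((arr.drop s).take L).length = L := by
      rw [List.length_take, List.length_drop]; omega
    -- the two midpoints agree
    set m : Int := PySem.Int.floordiv ((L : Int) - 1) 2 with hm
    have hmb := PySem.Int.floordiv_two_mid_bounds (by omega : (0:Int) ≤ (L : Int) - 1)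
    rw [zero_add, ← hm] at hmb
    obtain ⟨mN, hmN⟩ : ∃ mN : Nat, m = (mN : Int) := ⟨m.toNat, by omega⟩
    have hmid : PySem.Int.floordiv ((s : Int) + ((s : Int) + (L : Int) - 1)) 2
        = (s : Int) + m := by
      rw [hm, PySem.Int.floordiv_eq_ediv_of_pos (by norm_num),
          PySem.Int.floordiv_eq_ediv_of_pos (by norm_num)]
      omega
    -- the probed elements agree
    have hprobe : PySem.List.pyGet? arr ((s : Int) + m)
        = PySem.List.pyGet? ((arr.drop s).take L) m := by
      rw [hmN, ← Nat.cast_add, PySem.List.pyGet?_natCast, PySem.List.pyGet?_natCast,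
          List.getElem?_take_of_lt (by omega), List.getElem?_drop]
    have hne : ¬ (((arr.drop s).take L).isEmpty = true) := by
      simp [List.isEmpty_iff, ← List.length_eq_zero_iff, hseg, hL0]
    -- unfold one step of each program; both probe the same element
    rw [findLoop, if_pos (by omega), hmid]
    rw [findBs, if_neg hne]
    simp only [hseg]
    rw [← hm, ← hprobe, hmN]
    by_cases hc : ((PySem.List.pyGet? arr ((s : Int) + (mN : Int))).getD (0, 0)).1 ≥ v
    · -- probe qualifies: both recurse into the left part
      rw [if_pos hc, if_pos hc]
      have htake : PySem.List.slice ((arr.drop s).take L) none (some (mN : Int))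
          = (arr.drop s).take mN := by
        rw [PySem.List.slice_to _ (by omega), Int.toNat_natCast,
            List.take_take, Nat.min_eq_left (by omega)]
      rw [htake, IH mN (by omega) s ((s : Int) + (mN : Int)) (by omega)]
      have hF := findBs_bounds v ((arr.drop s).take mN)
      rw [List.length_take, List.length_drop, Nat.min_eq_left (by omega)] at hF
      split_ifs <;> omega
    · -- probe does not qualify: both recurse into the right part
      rw [if_neg hc, if_neg hc]
      have hdrop : PySem.List.slice ((arr.drop s).take L) (some ((mN : Int) + 1)) none
          = (arr.drop (s + (mN + 1))).take (L - (mN + 1)) := by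
        rw [PySem.List.slice_from _ (by omega),
            show ((mN : Int) + 1).toNat = mN + 1 by omega,
            List.drop_take, List.drop_drop]
      rw [hdrop,
          show ((s : Int) + (mN : Int) + 1) = ((s + (mN + 1) : Nat) : Int) by push_cast; ring,
          show ((s : Int) + (L : Int) - 1)
              = ((s + (mN + 1) : Nat) : Int) + ((L - (mN + 1) : Nat) : Int) - 1 by
            push_cast [Nat.cast_sub (by omega : mN + 1 ≤ L)]; omega,
          IH (L - (mN + 1)) (by omega) (s + (mN + 1)) idx (by omega)]
      have hF := findBs_bounds v ((arr.drop (s + (mN + 1))).take (L - (mN + 1)))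
      rw [List.length_take, List.length_drop, Nat.min_eq_left (by omega)] at hF
      push_cast [Nat.cast_sub (by omega : mN + 1 ≤ L)] at hF ⊢
      split_ifs <;> omega

-- ===== VERDICT (by name: the statement is the Claim_ definition above) =====
theorem find_spec : Claim_equal_find := by
  intro arr v _
  unfold Spec_find find find_alt
  have h := findLoop_eq_findBs arr v arr.length 0 (-1) (by omega)
  simp only [Nat.cast_zero, zero_add, List.drop_zero, List.take_length] at h
  rw [h]
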